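-- pv_equiv track=rewrite | github.com/Alpha0117/Sorting-Methods | sorting_algorithms.py | card_sort
-- ===== SOURCE A (Python) =====
-- def card_sort(arr):
--     steps = []
--
--     def insertion_sort(arr, start, gap):
--         for i in range(start + gap, len(arr), gap):
--             key = arr[i]
--             j = i - gap
--             while j >= start and arr[j] > key:
--                 arr[j + gap] = arr[j]
--                 j -= gap
--             arr[j + gap] = key
--             steps.append(list(arr))
--
--     n = len(arr)
--     gap = n // 2
--
--     while gap > 0:
--         for i in range(gap):
--             insertion_sort(arr, i, gap)
--         gap //= 2
--
--     return arr, steps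
-- ===== SOURCE B (Python) =====
-- def card_sort(arr):
--     # Shell sort with the same gap schedule and snapshot trace as the original,
--     # but each strided chain is re-sorted via an extracted sublist with binary
--     # insertion (bisect_right semantics) instead of the in-place linear shift-scan.
--     steps = []
--     n = len(arr)
--     gap = n // 2
--     while gap > 0:
--         for start in range(gap):
--             idx = list(range(start, n, gap))
--             sub = [arr[p] for p in idx]
--             for k in range(1, len(sub)):
--                 key = sub[k]
--                 lo, hi = 0, k
--                 while lo < hi:
--                     mid = (lo + hi) // 2
--                     if sub[mid] <= key:
--                         lo = mid + 1
--                     else: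
--                         hi = mid
--                 del sub[k]
--                 sub.insert(lo, key)
--                 for p, v in zip(idx, sub):
--                     arr[p] = v
--                 steps.append(list(arr))
--         gap //= 2
--     return arr, steps
-- ===== Notes on version B (the rewrite author's own statement) =====
-- stated objective: alternative
-- what changed: B extracts each strided gap-chain into a plain list, locates every insertion point with a hand-written binary search (bisect_right semantics) instead of A's in-place linear shift-scan, reinserts the key and scatters the chain back into the array before each snapshot, producing the identical trace of intermediate arrays.
import Mathlib
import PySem

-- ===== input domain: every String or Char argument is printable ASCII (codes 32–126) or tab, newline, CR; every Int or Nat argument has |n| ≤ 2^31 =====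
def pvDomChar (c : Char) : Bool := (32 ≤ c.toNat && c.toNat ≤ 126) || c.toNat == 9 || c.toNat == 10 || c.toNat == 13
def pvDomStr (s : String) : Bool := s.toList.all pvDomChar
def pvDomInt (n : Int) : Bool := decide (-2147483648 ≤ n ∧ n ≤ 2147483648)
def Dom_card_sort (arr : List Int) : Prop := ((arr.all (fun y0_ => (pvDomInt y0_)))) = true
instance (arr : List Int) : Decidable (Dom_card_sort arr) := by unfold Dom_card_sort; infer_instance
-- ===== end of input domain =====

-- B replaces A's in-place linear shift-scan by extracting each strided chain and
-- re-inserting elements with a hand-written binary search (bisect_right semantics),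
-- scattering the chain back after each placement; same gap schedule, same snapshots.
-- Both A and B mutate the Python argument list in place; the equivalence proved here
-- is about the RETURN value (A returns the same mutated list object, as does B).

-- ===== PORT A =====
-- inner `while j >= start and arr[j] > key:` loop; the `gap = 0` guard is only for
-- totality (A calls this with gap ≥ 1; the measure decreases by gap).
def pvShiftA (arr : List Int) (start : Int) (gap : Nat) (key j : Int) : List Int × Int :=
  if _hg : gap = 0 then (arr, j)
  else if start ≤ j ∧ PySem.List.pyGetD arr j 0 > key then
    pvShiftA (PySem.List.pySetD arr (j + gap) (PySem.List.pyGetD arr j 0)) start gap key (j - gap)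
  else (arr, j)
termination_by (j + 1 - start).toNat
decreasing_by
  rename_i h
  omega

-- `insertion_sort(arr, start, gap)` acting on the (arr, steps) state
def pvInsA (start : Int) (gap : Nat) (s : List Int × List (List Int)) :
    List Int × List (List Int) :=
  (PySem.List.pyRange (start + gap) s.1.length gap).foldl
    (fun s i =>
      let key := PySem.List.pyGetD s.1 i 0
      let r := pvShiftA s.1 start gap key (i - gap)
      let a2 := PySem.List.pySetD r.1 (r.2 + gap) key
      (a2, s.2 ++ [a2])) s

-- `while gap > 0:` loop
def pvGapsA (arr : List Int) (steps : List (List Int)) (gap : Nat) :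
    List Int × List (List Int) :=
  if gap = 0 then (arr, steps)
  else
    let s := (PySem.List.pyRange 0 gap 1).foldl (fun s i => pvInsA i gap s) (arr, steps)
    pvGapsA s.1 s.2 (gap / 2)
termination_by gap
decreasing_by omega

def card_sort (arr : List Int) : List Int × List (List Int) :=
  pvGapsA arr [] (arr.length / 2)

-- ===== PORT B =====
-- hand-written binary search of Source B (bisect_right semantics); lo, hi stay ≥ 0 in Python
def pvBisB (sub : List Int) (key : Int) (lo hi : Nat) : Nat :=
  if lo < hi then
    let mid := (lo + hi) / 2
    if PySem.List.pyGetD sub (mid : Int) 0 ≤ key then pvBisB sub key (mid + 1) hi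
    else pvBisB sub key lo mid
  else lo
termination_by hi - lo
decreasing_by
  · omega
  · omega

-- body of `for k in range(1, len(sub))`, state (arr, sub, steps)
def pvStepB (idx : List Int) (st : List Int × List Int × List (List Int)) (k : Int) :
    List Int × List Int × List (List Int) :=
  let key := PySem.List.pyGetD st.2.1 k 0
  let lo := pvBisB st.2.1 key 0 k.toNat
  let sub1 := (st.2.1).eraseIdx k.toNat                 -- del sub[k]  (1 ≤ k < len sub)
  let sub2 := PySem.List.insert sub1 (lo : Int) key     -- sub.insert(lo, key)
  let arr2 := (idx.zip sub2).foldl (fun a pv => PySem.List.pySetD a pv.1 pv.2) st.1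
  (arr2, sub2, st.2.2 ++ [arr2])

-- body of `for start in range(gap)`
def pvPassB (n : Int) (gap : Nat) (s : List Int × List (List Int)) (start : Int) :
    List Int × List (List Int) :=
  let idx := PySem.List.pyRange start n gap
  let sub := idx.map (fun p => PySem.List.pyGetD s.1 p 0)
  let r := (PySem.List.pyRange 1 sub.length 1).foldl (pvStepB idx) (s.1, sub, s.2)
  (r.1, r.2.2)

def pvGapsB (n : Int) (arr : List Int) (steps : List (List Int)) (gap : Nat) :
    List Int × List (List Int) :=
  if gap = 0 then (arr, steps)
  else
    let s := (PySem.List.pyRange 0 gap 1).foldl (pvPassB n gap) (arr, steps)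
    pvGapsB n s.1 s.2 (gap / 2)
termination_by gap
decreasing_by omega

def card_sort_alt (arr : List Int) : List Int × List (List Int) :=
  pvGapsB arr.length arr [] (arr.length / 2)

-- ===== PRECONDITION & SPEC =====
def Spec_card_sort (arr : List Int) (out : List Int × List (List Int)) : Prop := out = card_sort_alt arr
instance (arr : List Int) (out : List Int × List (List Int)) : Decidable (Spec_card_sort arr out) := by unfold Spec_card_sort; infer_instance

-- ===== CLAIM (what is proved, stated in full; the proofs are below) =====
def Claim_equal_card_sort : Prop := ∀ (arr : List Int), Dom_card_sort arr → Spec_card_sort arr (card_sort arr)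


-- ===== LEMMAS AND PROOFS =====

-- accessor `xs[q]` for a Nat index (total form; used only at in-range indices)
def pvAc (X : List Int) (q : Nat) : Int := PySem.List.pyGetD X (q : Int) 0

-- the strided chain arr[start::gap] as B extracts it (n = len(arr))
def pvSubN (n start gap : Nat) (arr : List Int) : List Int :=
  (PySem.List.pyRange (start : Int) (n : Int) (gap : Int)).map
    (fun p => PySem.List.pyGetD arr p 0)

-- insertion position found by A's right-to-left scan through sub[0..t]
def pvPos (sub : List Int) (key : Int) : Nat → Nat
  | 0 => if key < pvAc sub 0 then 0 else 1
  | t+1 => if key < pvAc sub (t+1) then pvPos sub key t else t+2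

theorem pvInj (start gap u t : Nat) (hg : 0 < gap)
    (h : start + gap * u = start + gap * t) : u = t := by
  exact Nat.eq_of_mul_eq_mul_left hg (m := u) (k := t) (by omega)

theorem pvRng_get (a b s : Nat) (hs : 0 < s) {t : Nat}
    (ht : t < (PySem.List.pyRange (a : Int) (b : Int) (s : Int)).length) :
    (PySem.List.pyRange (a : Int) (b : Int) (s : Int))[t] = ((a + s * t : Nat) : Int) := by
  have hrw := PySem.List.pyRange_of_pos (a : Int) (b : Int) (s := (s : Int))
    (by exact_mod_cast hs)
  have hlt : t < (if (a : Int) < (b : Int)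
      then (((b : Int) - (a : Int) + (s : Int) - 1) / (s : Int)).toNat else 0) := by
    have h := ht
    rw [hrw] at h
    simpa using h
  have h1 : (PySem.List.pyRange (a : Int) (b : Int) (s : Int))[t]?
      = some ((a + s * t : Nat) : Int) := by
    rw [hrw, List.getElem?_map, List.getElem?_range hlt, Option.map_some]
    norm_cast
  rw [List.getElem?_eq_getElem ht] at h1
  exact Option.some.inj h1

theorem pvRng_lt (a b s : Nat) (hs : 0 < s) (t : Nat) :
    t < (PySem.List.pyRange (a : Int) (b : Int) (s : Int)).length ↔ a + s * t < b := by
  constructor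
  · intro ht
    have hmem := List.getElem_mem ht
    rw [pvRng_get a b s hs ht] at hmem
    obtain ⟨-, h2, -⟩ :=
      (PySem.List.mem_pyRange_iff_of_pos (by exact_mod_cast hs) _).1 hmem
    exact_mod_cast h2
  · intro h
    have hmem : ((a + s * t : Nat) : Int) ∈
        PySem.List.pyRange (a : Int) (b : Int) (s : Int) :=
      (PySem.List.mem_pyRange_iff_of_pos (by exact_mod_cast hs) _).2
        ⟨by push_cast; omega, by exact_mod_cast h, ⟨(t : Int), by push_cast; ring⟩⟩
    obtain ⟨u, hu, hequ⟩ := List.getElem_of_mem hmem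
    rw [pvRng_get a b s hs hu] at hequ
    have : u = t := pvInj a s u t hs (by exact_mod_cast hequ)
    omega

theorem pvAc_set (X : List Int) (i : Nat) (v : Int) (hi : i < X.length) (q : Nat) :
    pvAc (PySem.List.pySetD X (i : Int) v) q = if q = i then v else pvAc X q := by
  simpa [pvAc] using PySem.List.pyGetD_pySetD_natCast X i q v 0 hi

theorem pvAc_eq_getElem (X : List Int) (q : Nat) (h : q < X.length) : pvAc X q = X[q] := by
  simp [pvAc, PySem.List.pyGetD_natCast, List.getD_eq_getElem?_getD, List.getElem?_eq_getElem h]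

theorem pvLen_sub (n start gap : Nat) (arr : List Int) :
    (pvSubN n start gap arr).length
      = (PySem.List.pyRange (start : Int) (n : Int) (gap : Int)).length := by
  simp [pvSubN]

theorem pvAc_sub (n start gap : Nat) (arr : List Int) (hg : 0 < gap) (t : Nat)
    (ht : start + gap * t < n) :
    pvAc (pvSubN n start gap arr) t = pvAc arr (start + gap * t) := by
  have ht' : t < (PySem.List.pyRange (start : Int) (n : Int) (gap : Int)).length :=
    (pvRng_lt start n gap hg t).2 ht
  unfold pvSubN pvAc
  rw [PySem.List.pyGetD_natCast, List.getD_eq_getElem?_getD,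
    List.getElem?_eq_getElem (by simpa using ht')]
  simp only [List.getElem_map, pvRng_get start n gap hg ht', Option.getD_some]

theorem pvPos_le (sub : List Int) (key : Int) (t : Nat) : pvPos sub key t ≤ t + 1 := by
  induction t with
  | zero => unfold pvPos; split_ifs <;> omega
  | succ t ih => unfold pvPos; split_ifs <;> omega

theorem pvPos_gt (sub : List Int) (key : Int) (t u : Nat)
    (h1 : pvPos sub key t ≤ u) (h2 : u ≤ t) : key < pvAc sub u := by
  induction t with
  | zero =>
    unfold pvPos at h1
    split_ifs at h1 with hc
    · have : u = 0 := by omega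
      subst this; exact hc
    · omega
  | succ t ih =>
    unfold pvPos at h1
    split_ifs at h1 with hc
    · by_cases hu : u = t + 1
      · subst hu; exact hc
      · exact ih h1 (by omega)
    · omega

theorem pvPos_last (sub : List Int) (key : Int) (t : Nat) (h : 0 < pvPos sub key t) :
    pvAc sub (pvPos sub key t - 1) ≤ key := by
  induction t with
  | zero =>
    unfold pvPos at h ⊢
    split_ifs at h ⊢ with hc
    · omega
    · simpa using (by omega : pvAc sub 0 ≤ key)
  | succ t ih =>
    unfold pvPos at h ⊢
    split_ifs at h ⊢ with hc
    · exact ih h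
    · simpa using (by omega : pvAc sub (t + 1) ≤ key)

theorem pvPos_iff (sub : List Int) (key : Int) (k : Nat) (hk : 1 ≤ k)
    (Hsort : ∀ i j : Nat, i ≤ j → j < k → pvAc sub i ≤ pvAc sub j)
    (i : Nat) (hik : i < k) :
    pvAc sub i ≤ key ↔ i < pvPos sub key (k - 1) := by
  constructor
  · intro hle
    by_contra hnl
    have := pvPos_gt sub key (k - 1) i (by omega) (by omega)
    omega
  · intro hip
    have hlast := pvPos_last sub key (k - 1) (by omega)
    have hple := pvPos_le sub key (k - 1)
    have h1 : pvAc sub i ≤ pvAc sub (pvPos sub key (k - 1) - 1) :=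
      Hsort i (pvPos sub key (k - 1) - 1) (by omega) (by omega)
    omega

theorem pvBis_eq (sub : List Int) (key : Int) (p k : Nat)
    (Hp : ∀ i : Nat, i < k → (pvAc sub i ≤ key ↔ i < p)) :
    ∀ d lo hi : Nat, hi - lo ≤ d → lo ≤ p → p ≤ hi → hi ≤ k → pvBisB sub key lo hi = p := by
  intro d
  induction d with
  | zero =>
    intro lo hi hd h1 h2 h3
    rw [pvBisB, if_neg (by omega)]
    omega
  | succ d ih =>
    intro lo hi hd h1 h2 h3
    rw [pvBisB]
    by_cases hlh : lo < hi
    · rw [if_pos hlh]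
      by_cases hc : PySem.List.pyGetD sub ((((lo + hi) / 2 : Nat)) : Int) 0 ≤ key
      · rw [if_pos hc]
        have hmk : (lo + hi) / 2 < k := by omega
        have hmp : (lo + hi) / 2 < p := by
          have := (Hp _ hmk).1 hc
          omega
        exact ih ((lo + hi) / 2 + 1) hi (by omega) (by omega) h2 h3
      · rw [if_neg hc]
        have hmk : (lo + hi) / 2 < k := by omega
        have hmp : p ≤ (lo + hi) / 2 := by
          by_contra hcon
          exact hc ((Hp _ hmk).2 (by omega))
        exact ih lo ((lo + hi) / 2) (by omega) h1 hmp (by omega)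
    · rw [if_neg hlh]
      omega

theorem pvScat_len (l : List (Int × Int)) (X : List Int) :
    (l.foldl (fun a pv => PySem.List.pySetD a pv.1 pv.2) X).length = X.length := by
  induction l generalizing X with
  | nil => rfl
  | cons pv l ih => simp [List.foldl_cons, ih, PySem.List.length_pySetD]

theorem pvScat_untouched (l : List (Int × Int)) (X : List Int) (q : Nat)
    (hr : ∀ pv ∈ l, 0 ≤ pv.1 ∧ pv.1 < X.length)
    (hq : ∀ pv ∈ l, pv.1 ≠ (q : Int)) :
    pvAc (l.foldl (fun a pv => PySem.List.pySetD a pv.1 pv.2) X) q = pvAc X q := by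
  induction l generalizing X with
  | nil => rfl
  | cons pv l ih =>
    obtain ⟨hnn, hlt⟩ := hr pv (by simp)
    have hne : pv.1 ≠ (q : Int) := hq pv (by simp)
    have hcast : pv.1 = ((pv.1.toNat : Nat) : Int) := by omega
    have hstep : pvAc (PySem.List.pySetD X pv.1 pv.2) q = pvAc X q := by
      rw [hcast, pvAc_set X pv.1.toNat pv.2 (by omega) q, if_neg (by omega)]
    rw [List.foldl_cons,
      ih (PySem.List.pySetD X pv.1 pv.2)
        (fun pv' h' => by
          have := hr pv' (by simp [h'])
          simpa [PySem.List.length_pySetD] using this)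
        (fun pv' h' => hq pv' (by simp [h'])),
      hstep]

theorem pvScat_hit (l1 l2 : List (Int × Int)) (pq : Int × Int) (X : List Int) (q : Nat)
    (hr : ∀ pv ∈ l1 ++ pq :: l2, 0 ≤ pv.1 ∧ pv.1 < X.length)
    (hpq : pq.1 = (q : Int))
    (h2 : ∀ pv ∈ l2, pv.1 ≠ (q : Int)) :
    pvAc ((l1 ++ pq :: l2).foldl (fun a pv => PySem.List.pySetD a pv.1 pv.2) X) q = pq.2 := by
  rw [List.foldl_append, List.foldl_cons]
  have hlen1 : (l1.foldl (fun a pv => PySem.List.pySetD a pv.1 pv.2) X).length = X.length :=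
    pvScat_len l1 X
  obtain ⟨-, hql⟩ := hr pq (by simp)
  have hq' : q < X.length := by omega
  have hset : pvAc (PySem.List.pySetD
      (l1.foldl (fun a pv => PySem.List.pySetD a pv.1 pv.2) X) pq.1 pq.2) q = pq.2 := by
    rw [hpq, pvAc_set _ q pq.2 (by omega) q, if_pos rfl]
  rw [pvScat_untouched l2 _ q
      (fun pv' h' => by
        have := hr pv' (by simp [h'])
        simpa [PySem.List.length_pySetD, hlen1] using this)
      h2, hset]

theorem pvAc_q (X : List Int) (q : Nat) : pvAc X q = X[q]?.getD 0 := by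
  simp [pvAc, PySem.List.pyGetD_natCast, List.getD_eq_getElem?_getD]

theorem pvShift_spec (start gap : Nat) (hg : 0 < gap) (sub : List Int) (key : Int)
    (n k : Nat) (hk : start + gap * k < n) :
    ∀ (t : Nat) (arrC : List Int), arrC.length = n → t < k →
      (∀ u : Nat, u ≤ t → pvAc arrC (start + gap * u) = pvAc sub u) →
      ∃ arrOut : List Int,
        pvShiftA arrC (start : Int) gap key ((start + gap * t : Nat) : Int)
          = (arrOut, ((start + gap * pvPos sub key t : Nat) : Int) - (gap : Int))
        ∧ arrOut.length = n
        ∧ (∀ u : Nat, pvPos sub key t ≤ u → u ≤ t →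
            pvAc arrOut (start + gap * (u + 1)) = pvAc sub u)
        ∧ (∀ q : Nat,
            (∀ u : Nat, pvPos sub key t ≤ u → u ≤ t → q ≠ start + gap * (u + 1)) →
            pvAc arrOut q = pvAc arrC q) := by
  intro t
  induction t with
  | zero =>
    intro arrC hlenC ht hag
    have hpos1 : start + gap * (0 + 1) < n := by
      have : gap * (0 + 1) ≤ gap * k := Nat.mul_le_mul_left _ (by omega)
      omega
    rw [pvShiftA, dif_neg (by omega)]
    by_cases hc : key < pvAc sub 0
    · have hcond : ((start : Int)) ≤ ((start + gap * 0 : Nat) : Int) ∧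
          PySem.List.pyGetD arrC ((start + gap * 0 : Nat) : Int) 0 > key := by
        refine ⟨by push_cast; omega, ?_⟩
        have h0 := hag 0 (le_refl 0)
        simp only [pvAc] at h0
        rw [h0]
        exact hc
      rw [if_pos hcond]
      have e1 : ((start + gap * 0 : Nat) : Int) + (gap : Int)
          = ((start + gap * (0 + 1) : Nat) : Int) := by push_cast; ring
      have e3 : PySem.List.pyGetD arrC ((start + gap * 0 : Nat) : Int) 0 = pvAc sub 0 :=
        hag 0 (le_refl 0)
      rw [e1, e3]
      rw [pvShiftA, dif_neg (by omega), if_neg (by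
        intro hcon
        have := hcon.1
        have hgap : (1 : Int) ≤ (gap : Int) := by exact_mod_cast hg
        push_cast at this
        omega)]
      have hp0 : pvPos sub key 0 = 0 := by simp only [pvPos]; rw [if_pos hc]
      refine ⟨PySem.List.pySetD arrC ((start + gap * (0 + 1) : Nat) : Int) (pvAc sub 0),
        ?_, ?_, ?_, ?_⟩
      · rw [hp0]
      · rw [PySem.List.length_pySetD]; exact hlenC
      · intro u h1 h2
        have hu : u = 0 := by omega
        subst hu
        rw [pvAc_set arrC _ _ (by omega) _, if_pos rfl]
      · intro q hq
        rw [pvAc_set arrC _ _ (by omega) _, if_neg (hq 0 (by rw [hp0]) (le_refl 0))]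
    · have hp0 : pvPos sub key 0 = 1 := by simp only [pvPos]; rw [if_neg hc]
      rw [if_neg (by
        intro hcon
        have h0 := hag 0 (le_refl 0)
        simp only [pvAc] at h0
        rw [h0] at hcon
        exact hc hcon.2)]
      refine ⟨arrC, ?_, hlenC, ?_, ?_⟩
      · rw [hp0]
        congr 1
        push_cast
        ring
      · intro u h1 h2
        rw [hp0] at h1
        omega
      · intro q hq
        rfl
  | succ s ih =>
    intro arrC hlenC ht hag
    have hposS : start + gap * (s + 2) < n := by
      have : gap * (s + 2) ≤ gap * k := Nat.mul_le_mul_left _ (by omega)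
      omega
    rw [pvShiftA, dif_neg (by omega)]
    by_cases hc : key < pvAc sub (s + 1)
    · have hcond : ((start : Int)) ≤ ((start + gap * (s + 1) : Nat) : Int) ∧
          PySem.List.pyGetD arrC ((start + gap * (s + 1) : Nat) : Int) 0 > key := by
        refine ⟨by exact_mod_cast Nat.le_add_right start (gap * (s + 1)), ?_⟩
        have h0 := hag (s + 1) (le_refl _)
        simp only [pvAc] at h0
        rw [h0]
        exact hc
      rw [if_pos hcond]
      have e1 : ((start + gap * (s + 1) : Nat) : Int) + (gap : Int)
          = ((start + gap * (s + 2) : Nat) : Int) := by push_cast; ring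
      have e2 : ((start + gap * (s + 1) : Nat) : Int) - (gap : Int)
          = ((start + gap * s : Nat) : Int) := by push_cast; ring
      have e3 : PySem.List.pyGetD arrC ((start + gap * (s + 1) : Nat) : Int) 0 = pvAc sub (s + 1) :=
        hag (s + 1) (le_refl _)
      rw [e1, e2, e3]
      set arrC' := PySem.List.pySetD arrC ((start + gap * (s + 2) : Nat) : Int) (pvAc sub (s + 1))
        with harrC'
      have hlen' : arrC'.length = n := by rw [harrC', PySem.List.length_pySetD]; exact hlenC
      have hag' : ∀ u : Nat, u ≤ s → pvAc arrC' (start + gap * u) = pvAc sub u := by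
        intro u hu
        rw [harrC', pvAc_set arrC _ _ (by omega) _, if_neg (by
          intro hcon
          have := pvInj start gap u (s + 2) hg hcon
          omega)]
        exact hag u (by omega)
      obtain ⟨arrOut, hrec, hlenO, hwr, hun⟩ := ih arrC' hlen' (by omega) hag'
      have hps : pvPos sub key (s + 1) = pvPos sub key s := by
        simp only [pvPos]; rw [if_pos hc]
      rw [hrec, hps]
      refine ⟨arrOut, rfl, hlenO, ?_, ?_⟩
      · intro u h1 h2
        by_cases hu : u = s + 1
        · subst hu
          rw [hun (start + gap * (s + 2)) (by
            intro u' h1' h2' hcon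
            have := pvInj start gap (s + 2) (u' + 1) hg hcon
            omega)]
          rw [harrC', pvAc_set arrC _ _ (by omega) _, if_pos rfl]
        · exact hwr u h1 (by omega)
      · intro q hq
        rw [hun q (fun u' h1' h2' => hq u' h1' (by omega))]
        rw [harrC', pvAc_set arrC _ _ (by omega) _, if_neg (by
          intro hcon
          exact hq (s + 1) (le_trans (pvPos_le sub key s) (by omega)) (le_refl _) (by omega))]
    · have hps : pvPos sub key (s + 1) = s + 2 := by
        simp only [pvPos]; rw [if_neg hc]
      rw [if_neg (by
        intro hcon
        have h0 := hag (s + 1) (le_refl _)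
        simp only [pvAc] at h0
        rw [h0] at hcon
        exact hc hcon.2)]
      refine ⟨arrC, ?_, hlenC, ?_, ?_⟩
      · rw [hps]
        congr 1
        push_cast
        ring
      · intro u h1 h2
        rw [hps] at h1
        omega
      · intro q hq
        rfl

theorem pvStep_eq (start gap n : Nat) (hg : 0 < gap) (k : Nat) (hk1 : 1 ≤ k)
    (arr : List Int) (steps : List (List Int)) (hlen : arr.length = n)
    (hk : start + gap * k < n)
    (Hsort : ∀ i j : Nat, i ≤ j → j < k →
      pvAc (pvSubN n start gap arr) i ≤ pvAc (pvSubN n start gap arr) j) :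
    ∃ arr2 : List Int,
      (let key := PySem.List.pyGetD arr ((start + gap * k : Nat) : Int) 0
       let r := pvShiftA arr (start : Int) gap key (((start + gap * k : Nat) : Int) - (gap : Int))
       (PySem.List.pySetD r.1 (r.2 + gap) key, steps ++ [PySem.List.pySetD r.1 (r.2 + gap) key]))
        = (arr2, steps ++ [arr2])
      ∧ pvStepB (PySem.List.pyRange (start : Int) (n : Int) (gap : Int))
          (arr, pvSubN n start gap arr, steps) (k : Int)
          = (arr2, pvSubN n start gap arr2, steps ++ [arr2])
      ∧ arr2.length = n
      ∧ (∀ i j : Nat, i ≤ j → j < k + 1 →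
          pvAc (pvSubN n start gap arr2) i ≤ pvAc (pvSubN n start gap arr2) j) := by
  obtain ⟨k', rfl⟩ : ∃ k', k = k' + 1 := ⟨k - 1, by omega⟩
  set sub := pvSubN n start gap arr with hsubdef
  set idx := PySem.List.pyRange (start : Int) (n : Int) (gap : Int) with hidxdef
  have hmono : ∀ u : Nat, u ≤ k' + 1 → start + gap * u < n := by
    intro u hu
    have : gap * u ≤ gap * (k' + 1) := Nat.mul_le_mul_left gap hu
    omega
  have hmk : k' + 1 < idx.length := (pvRng_lt start n gap hg (k' + 1)).2 hk
  have hsublen : sub.length = idx.length := pvLen_sub n start gap arr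
  set keyS := pvAc sub (k' + 1) with hkeyS
  set p := pvPos sub keyS k' with hpdef
  have hple : p ≤ k' + 1 := pvPos_le sub keyS k'
  have hplt : start + gap * p < n := hmono p hple
  have hsubac : ∀ u : Nat, u ≤ k' + 1 → pvAc sub u = pvAc arr (start + gap * u) := by
    intro u hu
    exact pvAc_sub n start gap arr hg u (hmono u hu)
  have Hp : ∀ i : Nat, i < k' + 1 → (pvAc sub i ≤ keyS ↔ i < p) := by
    intro i hi
    simpa using pvPos_iff sub keyS (k' + 1) (by omega) Hsort i hi
  -- ===== A side: run the shift loop =====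
  obtain ⟨arrOut, hrec, hlenO, hwr, hun⟩ :=
    pvShift_spec start gap hg sub keyS n (k' + 1) hk k' arr hlen (by omega)
      (fun u hu => (hsubac u (by omega)).symm)
  set arr2 := PySem.List.pySetD arrOut ((start + gap * p : Nat) : Int) keyS with harr2
  have hlen2 : arr2.length = n := by rw [harr2, PySem.List.length_pySetD]; exact hlenO
  -- accessor description of A's result
  have hA : ∀ q : Nat, pvAc arr2 q
      = if q = start + gap * p then keyS else pvAc arrOut q := by
    intro q
    rw [harr2]
    exact pvAc_set arrOut _ keyS (by omega) q
  -- ===== B side =====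
  have hkeyB : PySem.List.pyGetD sub ((k' + 1 : Nat) : Int) 0 = keyS := rfl
  have hloB : pvBisB sub keyS 0 (k' + 1) = p :=
    pvBis_eq sub keyS p (k' + 1) Hp (k' + 1) 0 (k' + 1) (by omega) (by omega) hple (le_refl _)
  set sub1 := sub.eraseIdx (k' + 1) with hsub1
  have hsub1len : sub1.length = idx.length - 1 := by
    rw [hsub1, List.length_eraseIdx, if_pos (by omega)]
    omega
  set sub2 := PySem.List.insert sub1 ((p : Nat) : Int) keyS with hsub2
  have hins : sub2 = sub1.take p ++ keyS :: sub1.drop p :=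
    PySem.List.insert_natCast sub1 p keyS (by omega)
  have hsub2len : sub2.length = idx.length := by
    rw [hins]
    simp
    omega
  -- accessor description of the re-inserted chain
  have hB2 : ∀ t : Nat, t < idx.length → pvAc sub2 t
      = if t < p then pvAc sub t
        else if t = p then keyS
        else if t ≤ k' + 1 then pvAc sub (t - 1) else pvAc sub t := by
    intro t htm
    have htake : (sub1.take p).length = p := by
      rw [List.length_take]
      omega
    rw [pvAc_q, hins]
    by_cases h1 : t < p
    · rw [List.getElem?_append_left (by omega), List.getElem?_take_of_lt h1, if_pos h1]
      rw [hsub1, List.getElem?_eraseIdx, if_pos (by omega), ← pvAc_q]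
    · rw [List.getElem?_append_right (by omega), htake, if_neg h1]
      by_cases h2 : t = p
      · subst h2
        simp
      · rw [if_neg h2]
        have ht1 : t - p = (t - p - 1) + 1 := by omega
        rw [ht1]
        simp only [List.getElem?_cons_succ]
        rw [List.getElem?_drop, hsub1, List.getElem?_eraseIdx]
        have hpt : p + (t - p - 1) = t - 1 := by omega
        rw [hpt]
        by_cases h3 : t ≤ k' + 1
        · rw [if_pos (by omega), if_pos h3, ← pvAc_q]
        · rw [if_neg (by omega), if_neg h3]
          have : t - 1 + 1 = t := by omega
          rw [this, ← pvAc_q]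
  -- the scatter write list
  set wl := idx.zip sub2 with hwl
  have hwl_len : wl.length = idx.length := by
    rw [hwl, List.length_zip, hsub2len]
    omega
  have hwl_val : ∀ (u : Nat) (hu : u < wl.length), wl[u]'hu
      = (((start + gap * u : Nat) : Int), pvAc sub2 u) := by
    intro u hu
    have hu2 : u < idx.length := by omega
    have hu3 : u < sub2.length := by omega
    rw [List.getElem_zip (h := hu)]
    refine Prod.ext ?_ ?_
    · exact pvRng_get start n gap hg hu2
    · exact (pvAc_eq_getElem sub2 u hu3).symm
  have hwl_range : ∀ pv ∈ wl, 0 ≤ pv.1 ∧ pv.1 < (arr.length : Int) := by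
    intro pv hpv
    obtain ⟨u, hu, hval⟩ := List.getElem_of_mem hpv
    rw [hwl_val u hu] at hval
    rw [← hval]
    constructor
    · exact Int.natCast_nonneg _
    · show ((start + gap * u : Nat) : Int) < ((arr.length : Nat) : Int)
      rw [hlen]
      have hu2 : u < idx.length := by omega
      exact_mod_cast (pvRng_lt start n gap hg u).1 hu2
  set arr2B := wl.foldl (fun a pv => PySem.List.pySetD a pv.1 pv.2) arr with harr2B
  have hlen2B : arr2B.length = n := by rw [harr2B, pvScat_len, hlen]
  -- hit: stride position t gets sub2[t]
  have hBhit : ∀ t : Nat, t < idx.length → pvAc arr2B (start + gap * t) = pvAc sub2 t := by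
    intro t ht
    have htw : t < wl.length := by omega
    have hdec : wl = wl.take t ++ (((start + gap * t : Nat) : Int), pvAc sub2 t) :: wl.drop (t + 1) := by
      conv_lhs => rw [← List.take_append_drop t wl, List.drop_eq_getElem_cons htw]
      rw [hwl_val t htw]
    rw [harr2B, hdec, pvScat_hit (wl.take t) (wl.drop (t + 1)) _ arr (start + gap * t)
        (by rw [← hdec]; exact hwl_range)
        rfl
        ?_]
    intro pv hpv
    obtain ⟨jj, hjj, hpvj⟩ := List.getElem_of_mem hpv
    have hld : (wl.drop (t + 1)).length = wl.length - (t + 1) := List.length_drop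
    have hjl : t + 1 + jj < wl.length := by omega
    rw [List.getElem_drop] at hpvj
    rw [← hpvj, hwl_val (t + 1 + jj) hjl]
    show ((start + gap * (t + 1 + jj) : Nat) : Int) ≠ ((start + gap * t : Nat) : Int)
    intro hcon
    have h1 : start + gap * (t + 1 + jj) = start + gap * t := by exact_mod_cast hcon
    have := pvInj start gap (t + 1 + jj) t hg h1
    omega
  -- untouched positions
  have hBun : ∀ q : Nat, (∀ t : Nat, t < idx.length → q ≠ start + gap * t) →
      pvAc arr2B q = pvAc arr q := by
    intro q hq
    rw [harr2B]
    apply pvScat_untouched wl arr q hwl_range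
    intro pv hpv
    obtain ⟨jj, hjj, hpvj⟩ := List.getElem_of_mem hpv
    rw [hwl_val jj hjj] at hpvj
    rw [← hpvj]
    show ((start + gap * jj : Nat) : Int) ≠ (q : Int)
    intro hcon
    exact hq jj (by omega) (by exact_mod_cast hcon.symm)
  -- ===== the two results agree =====
  rw [← hpdef] at hrec hwr hun
  have hsubac' : ∀ u : Nat, u < idx.length → pvAc sub u = pvAc arr (start + gap * u) :=
    fun u hu => pvAc_sub n start gap arr hg u ((pvRng_lt start n gap hg u).1 hu)
  have hE1 : arr2B = arr2 := by
    apply List.ext_getElem (by omega)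
    intro q h1 h2
    rw [← pvAc_eq_getElem arr2B q h1, ← pvAc_eq_getElem arr2 q h2]
    by_cases hq : ∃ t : Nat, t < idx.length ∧ q = start + gap * t
    · obtain ⟨t, htm, rfl⟩ := hq
      rw [hBhit t htm, hB2 t htm, hA]
      have hne : t ≠ p → start + gap * t ≠ start + gap * p :=
        fun h hcon => h (pvInj start gap t p hg hcon)
      by_cases hc1 : t < p
      · rw [if_pos hc1, if_neg (hne (by omega))]
        rw [hun _ (by
          intro u h1' h2' hcon
          have := pvInj start gap t (u + 1) hg hcon
          omega)]
        exact hsubac' t htm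
      · by_cases hc2 : t = p
        · subst hc2
          rw [if_neg (by omega), if_pos rfl, if_pos rfl]
        · rw [if_neg hc1, if_neg hc2, if_neg (hne hc2)]
          by_cases hc3 : t ≤ k' + 1
          · rw [if_pos hc3]
            rw [show t = (t - 1) + 1 from by omega]
            simp only [Nat.add_sub_cancel]
            exact (hwr (t - 1) (by omega) (by omega)).symm
          · rw [if_neg hc3]
            rw [hun _ (by
              intro u h1' h2' hcon
              have := pvInj start gap t (u + 1) hg hcon
              omega)]
            exact hsubac' t htm
    · push_neg at hq
      rw [hBun q hq, hA, if_neg (hq p (by omega)), hun q (by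
        intro u h1' h2' hcon
        exact hq (u + 1) (by omega) hcon)]
  have hE2 : pvSubN n start gap arr2 = sub2 := by
    apply List.ext_getElem
    · rw [pvLen_sub n start gap arr2, ← hidxdef, hsub2len]
    · intro t h1 h2
      have e := pvLen_sub n start gap arr2
      rw [← hidxdef] at e
      have htm : t < idx.length := by omega
      rw [← pvAc_eq_getElem _ t h1, ← pvAc_eq_getElem sub2 t h2,
        pvAc_sub n start gap arr2 hg t ((pvRng_lt start n gap hg t).1 htm), ← hE1,
        hBhit t htm]
  have hgtp : ∀ u : Nat, p ≤ u → u ≤ k' → keyS < pvAc sub u :=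
    fun u h1 h2 => pvPos_gt sub keyS k' u h1 h2
  refine ⟨arr2, ?_, ?_, hlen2, ?_⟩
  · -- A's loop body produces arr2
    have hkeyA : PySem.List.pyGetD arr ((start + gap * (k' + 1) : Nat) : Int) 0 = keyS :=
      (hsubac (k' + 1) (le_refl _)).symm
    have eArg : ((start + gap * (k' + 1) : Nat) : Int) - (gap : Int)
        = ((start + gap * k' : Nat) : Int) := by push_cast; ring
    simp only [hkeyA, eArg, hrec, sub_add_cancel]
    rw [harr2]
  · -- B's loop body produces (arr2, its chain, the same snapshot)
    rw [hE2]
    simp only [pvStepB, Int.toNat_natCast, hkeyB, hloB, ← hsub1, ← hsub2, ← hwl, ← harr2B, hE1]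
  · -- the first k+1 chain entries are now sorted
    intro i j hij hj
    rw [hE2, hB2 i (by omega), hB2 j (by omega)]
    by_cases h1 : i < p
    · rw [if_pos h1]
      by_cases h2 : j < p
      · rw [if_pos h2]
        exact Hsort i j hij (by omega)
      · by_cases h3 : j = p
        · rw [if_neg h2, if_pos h3]
          exact (Hp i (by omega)).2 (by omega)
        · rw [if_neg h2, if_neg h3, if_pos (by omega : j ≤ k' + 1)]
          exact Hsort i (j - 1) (by omega) (by omega)
    · by_cases h2 : i = p
      · rw [if_neg h1, if_pos h2]
        by_cases h3 : j = p
        · rw [if_neg (by omega), if_pos h3]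
        · rw [if_neg (by omega), if_neg h3, if_pos (by omega)]
          exact le_of_lt (hgtp (j - 1) (by omega) (by omega))
      · rw [if_neg h1, if_neg h2, if_pos (by omega : i ≤ k' + 1),
          if_neg (by omega : ¬ j < p), if_neg (by omega : ¬ j = p), if_pos (by omega)]
        exact Hsort (i - 1) (j - 1) (by omega) (by omega)

theorem pvPass_eq (start gap n : Nat) (hg : 0 < gap) (arr : List Int)
    (steps : List (List Int)) (hlen : arr.length = n) :
    pvInsA (start : Int) gap (arr, steps) = pvPassB (n : Int) gap (arr, steps) (start : Int)
    ∧ (pvInsA (start : Int) gap (arr, steps)).1.length = n := by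
  have hm := pvLen_sub n start gap arr
  set m := (PySem.List.pyRange (start : Int) (n : Int) (gap : Int)).length with hmdef
  -- the two index lists, as maps over `List.range (m - 1)`
  have hiList : PySem.List.pyRange ((start : Int) + (gap : Int)) (n : Int) (gap : Int)
      = (List.range (m - 1)).map (fun t => ((start + gap * (t + 1) : Nat) : Int)) := by
    have e : ((start : Int) + (gap : Int)) = ((start + gap : Nat) : Int) := by push_cast; ring
    rw [e]
    apply List.ext_getElem
    · rw [List.length_map, List.length_range]
      have ha := fun t => pvRng_lt (start + gap) n gap hg t
      have hb := fun t => pvRng_lt start n gap hg t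
      have e1 : ∀ t : Nat, start + gap + gap * t = start + gap * (t + 1) := by
        intro t; rw [Nat.mul_succ]; omega
      have hkey : ∀ t : Nat,
          t < (PySem.List.pyRange ((start + gap : Nat) : Int) (n : Int) (gap : Int)).length
            ↔ t + 1 < m := by
        intro t
        have h1 := ha t
        have h2 := hb (t + 1)
        rw [← hmdef] at h2
        have e := e1 t
        omega
      have k1 := hkey ((PySem.List.pyRange ((start + gap : Nat) : Int) (n : Int) (gap : Int)).length)
      have k2 := hkey (m - 1)
      omega
    · intro t h1 h2
      rw [pvRng_get (start + gap) n gap hg h1]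
      rw [List.getElem_map, List.getElem_range]
      congr 1
      rw [Nat.mul_succ]
      omega
  have hkList : PySem.List.pyRange 1 (m : Int) 1
      = (List.range (m - 1)).map (fun t => ((t + 1 : Nat) : Int)) := by
    rw [PySem.List.pyRange_one]
    have e1 : ((m : Int) - 1).toNat = m - 1 := by omega
    rw [e1]
    apply List.map_congr_left
    intro t _
    push_cast
    ring
  -- the joint loop invariant, by induction on the number of processed elements
  have hloop : ∀ c : Nat, c ≤ m - 1 →
      ∃ (arrC : List Int) (stepsC : List (List Int)),
        (List.range c).foldl
          (fun s t =>
            (fun (s : List Int × List (List Int)) (i : Int) =>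
              let key := PySem.List.pyGetD s.1 i 0
              let r := pvShiftA s.1 (start : Int) gap key (i - gap)
              let a2 := PySem.List.pySetD r.1 (r.2 + gap) key
              (a2, s.2 ++ [a2])) s (((start + gap * (t + 1) : Nat) : Int)))
          (arr, steps) = (arrC, stepsC)
        ∧ (List.range c).foldl
            (fun st t => pvStepB (PySem.List.pyRange (start : Int) (n : Int) (gap : Int)) st
              (((t + 1 : Nat) : Int)))
            (arr, pvSubN n start gap arr, steps)
          = (arrC, pvSubN n start gap arrC, stepsC)
        ∧ arrC.length = n
        ∧ (∀ i j : Nat, i ≤ j → j < c + 1 →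
            pvAc (pvSubN n start gap arrC) i ≤ pvAc (pvSubN n start gap arrC) j) := by
    intro c
    induction c with
    | zero =>
      intro _
      refine ⟨arr, steps, rfl, rfl, hlen, ?_⟩
      intro i j hij hj
      have : i = 0 ∧ j = 0 := by omega
      rw [this.1, this.2]
    | succ c ih =>
      intro hc
      obtain ⟨arrC, stepsC, hAe, hBe, hlenC, hsortC⟩ := ih (by omega)
      have hkc : start + gap * (c + 1) < n := by
        have := (pvRng_lt start n gap hg (c + 1)).1 (by omega)
        exact this
      obtain ⟨arr2, hA2, hB2, hlen2, hsort2⟩ :=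
        pvStep_eq start gap n hg (c + 1) (by omega) arrC stepsC hlenC hkc hsortC
      refine ⟨arr2, stepsC ++ [arr2], ?_, ?_, hlen2, hsort2⟩
      · rw [List.range_succ, List.foldl_append, hAe, List.foldl_cons, List.foldl_nil]
        exact hA2
      · rw [List.range_succ, List.foldl_append, hBe, List.foldl_cons, List.foldl_nil]
        exact hB2
  obtain ⟨arrF, stepsF, hAe, hBe, hlenF, -⟩ := hloop (m - 1) (le_refl _)
  have hBdef : pvPassB (n : Int) gap (arr, steps) (start : Int)
      = (((PySem.List.pyRange 1 ((pvSubN n start gap arr).length : Int) 1).foldl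
            (pvStepB (PySem.List.pyRange (start : Int) (n : Int) (gap : Int)))
            (arr, pvSubN n start gap arr, steps)).1,
         ((PySem.List.pyRange 1 ((pvSubN n start gap arr).length : Int) 1).foldl
            (pvStepB (PySem.List.pyRange (start : Int) (n : Int) (gap : Int)))
            (arr, pvSubN n start gap arr, steps)).2.2) := rfl
  have hAdef : pvInsA (start : Int) gap (arr, steps)
      = (PySem.List.pyRange ((start : Int) + (gap : Int)) ((arr.length : Nat) : Int)
          (gap : Int)).foldl
          (fun (s : List Int × List (List Int)) (i : Int) =>
            let key := PySem.List.pyGetD s.1 i 0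
            let r := pvShiftA s.1 (start : Int) gap key (i - gap)
            let a2 := PySem.List.pySetD r.1 (r.2 + gap) key
            (a2, s.2 ++ [a2])) (arr, steps) := rfl
  have hAres : pvInsA (start : Int) gap (arr, steps) = (arrF, stepsF) := by
    rw [hAdef, hlen, hiList, List.foldl_map]
    exact hAe
  constructor
  · rw [hAres, hBdef, hm, hkList, List.foldl_map, hBe]
  · rw [hAres]
    exact hlenF

theorem pvFold_inv {α β : Type} (P : α → Prop) (f h : α → β → α) (l : List β) (s : α)
    (hs : P s) (H : ∀ a b, b ∈ l → P a → f a b = h a b ∧ P (f a b)) :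
    l.foldl f s = l.foldl h s ∧ P (l.foldl f s) := by
  induction l generalizing s with
  | nil => exact ⟨rfl, hs⟩
  | cons b l ih =>
    obtain ⟨he, hp⟩ := H s b (by simp) hs
    have := ih (f s b) hp (fun a b' hb' => H a b' (by simp [hb']))
    simpa [List.foldl_cons, he] using this

theorem pvGaps_eq (n : Nat) : ∀ (gap : Nat) (arr : List Int) (steps : List (List Int)),
    arr.length = n → pvGapsA arr steps gap = pvGapsB (n : Int) arr steps gap := by
  intro gap
  induction gap using Nat.strong_induction_on with
  | _ gap ih =>
    intro arr steps hlen
    rw [pvGapsA, pvGapsB]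
    by_cases hz : gap = 0
    · rw [if_pos hz, if_pos hz]
    · rw [if_neg hz, if_neg hz]
      obtain ⟨hfe, hfp⟩ := pvFold_inv (fun s : List Int × List (List Int) => s.1.length = n)
        (fun s i => pvInsA i gap s) (pvPassB (n : Int) gap)
        (PySem.List.pyRange 0 (gap : Int) 1) (arr, steps) hlen
        (by
          intro a b hb hP
          obtain ⟨hb0, hb1⟩ := PySem.List.mem_pyRange_one.1 hb
          have hbeq : b = ((b.toNat : Nat) : Int) := by omega
          obtain ⟨a1, a2⟩ := a
          rw [hbeq]
          exact pvPass_eq b.toNat gap n (by omega) a1 a2 hP)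
      simp only []
      rw [hfe]
      rw [hfe] at hfp
      exact ih (gap / 2) (by omega) _ _ hfp

-- ===== VERDICT (by name: the statement is the Claim_ definition above) =====
theorem card_sort_spec : Claim_equal_card_sort := by
  intro arr _
  unfold Spec_card_sort card_sort card_sort_alt
  exact pvGaps_eq arr.length (arr.length / 2) arr [] rfl
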